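-- pv_equiv track=rewrite | github.com/jiho4399/Programmers | levle02/PGM_귤고르기.py | solution
-- ===== SOURCE A (Python) =====
-- def solution(k, tangerine):
--     from collections import Counter
--
--     count = 0
--     tanger = sorted(Counter(tangerine).items(), key=lambda x:x[1], reverse=True)
--
--     for i, j in tanger:
--         k -= j
--         count += 1
--         if k <= 0:
--             break
--
--     return count
-- ===== SOURCE B (Python) =====
-- def solution(k, tangerine):
--     from collections import Counter
--
--     cnt = Counter(tangerine)
--     if not cnt:
--         return 0
--     vals = list(cnt.values())
--     m = max(vals)
--     buckets = Counter(vals)  # buckets[c] = how many tangerine sizes occur exactly c times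
--     ans = 0
--     for c in range(m, 0, -1):       # counting-sort walk, most frequent first; no sorting
--         for _ in range(buckets[c]):
--             k -= c
--             ans += 1
--             if k <= 0:
--                 return ans
--     return ans
-- ===== Notes on version B (the rewrite author's own statement) =====
-- stated objective: alternative
-- what changed: Replaces sorting the (size, count) pairs by count with a counting-sort bucket table (a Counter of the counts) walked from the maximum count downwards, subtracting each count until k is covered; no sort is performed.
import Mathlib
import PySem

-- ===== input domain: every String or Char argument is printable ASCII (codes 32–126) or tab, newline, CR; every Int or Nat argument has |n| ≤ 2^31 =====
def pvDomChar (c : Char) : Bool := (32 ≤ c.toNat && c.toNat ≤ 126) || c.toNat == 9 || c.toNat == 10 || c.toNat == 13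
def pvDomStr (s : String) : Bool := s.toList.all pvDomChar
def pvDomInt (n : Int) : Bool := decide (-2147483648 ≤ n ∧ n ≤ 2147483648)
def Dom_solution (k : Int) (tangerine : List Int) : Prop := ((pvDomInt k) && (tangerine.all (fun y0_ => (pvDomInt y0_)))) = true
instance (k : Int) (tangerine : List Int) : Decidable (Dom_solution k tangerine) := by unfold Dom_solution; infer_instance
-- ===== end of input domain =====

-- B replaces A's sort of (size, count) pairs by a bucket table of counts walked from the
-- maximum count down (a counting-sort scan); the return value is proved identical on all inputs.

-- ===== PORT A =====
-- the for-loop over the sorted items, state (k, count), break when k <= 0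
def aLoop : List (Int × Int) → Int → Int → Int
  | [], _, count => count
  | (_, j) :: rest, k, count =>
      if k - j ≤ 0 then count + 1
      else aLoop rest (k - j) (count + 1)

def solution (k : Int) (tangerine : List Int) : Int :=
  let tanger := PySem.List.sorted (PySem.Dict.counter tangerine).items (fun x => x.2) true
  aLoop tanger k 0

-- ===== PORT B =====
-- inner loop: for _ in range(n): k -= c; ans += 1; if k <= 0: return ans  (third component: returned?)
def altInner (c : Int) : Nat → Int → Int → Int × Int × Bool
  | 0, k, ans => (k, ans, false)
  | n + 1, k, ans =>
      if k - c ≤ 0 then (k - c, ans + 1, true)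
      else altInner c n (k - c) (ans + 1)

-- outer loop: for c in range(m, 0, -1)
def altOuter (buckets : PySem.Dict Int Int) : List Int → Int → Int → Int
  | [], _, ans => ans
  | c :: cs, k, ans =>
      match altInner c (buckets.getD c 0).toNat k ans with
      | (k', ans', done) => if done then ans' else altOuter buckets cs k' ans'

def solution_alt (k : Int) (tangerine : List Int) : Int :=
  let cnt := PySem.Dict.counter tangerine
  if cnt.items = [] then 0
  else
    let vals := cnt.values
    let m := PySem.List.maxD vals (fun x => x) 0
    let buckets := PySem.Dict.counter vals
    altOuter buckets (PySem.List.pyRange m 0 (-1)) k 0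

-- ===== PRECONDITION & SPEC =====
def Spec_solution (k : Int) (tangerine : List Int) (out : Int) : Prop := out = solution_alt k tangerine
instance (k : Int) (tangerine : List Int) (out : Int) : Decidable (Spec_solution k tangerine out) := by unfold Spec_solution; infer_instance

-- ===== CLAIM (what is proved, stated in full; the proofs are below) =====
def Claim_equal_solution : Prop := ∀ (k : Int) (tangerine : List Int), Dom_solution k tangerine → Spec_solution k tangerine (solution k tangerine)

-- ===== LEMMAS AND PROOFS =====

-- the common abstraction: consume a list of counts, stopping when k drops to 0
def runS : Int → Int → List Int → Int × Int × Bool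
  | k, ans, [] => (k, ans, false)
  | k, ans, c :: t =>
      if k - c ≤ 0 then (k - c, ans + 1, true)
      else runS (k - c) (ans + 1) t

theorem aLoop_eq_runS (l : List (Int × Int)) (k count : Int) :
    aLoop l k count = (runS k count (l.map (·.2))).2.1 := by
  induction l generalizing k count with
  | nil => rfl
  | cons p rest ih =>
    obtain ⟨i, j⟩ := p
    simp only [aLoop, List.map, runS]
    split_ifs with h
    · rfl
    · exact ih _ _

theorem runS_append (k ans : Int) (l1 l2 : List Int) :
    runS k ans (l1 ++ l2) =
      (if (runS k ans l1).2.2 then runS k ans l1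
       else runS (runS k ans l1).1 (runS k ans l1).2.1 l2) := by
  induction l1 generalizing k ans with
  | nil => simp [runS]
  | cons c t ih =>
    simp only [List.cons_append, runS]
    by_cases h : k - c ≤ 0
    · simp [h]
    · simp [h, ih]

theorem altInner_eq_runS (c : Int) (n : Nat) (k ans : Int) :
    altInner c n k ans = runS k ans (List.replicate n c) := by
  induction n generalizing k ans with
  | zero => rfl
  | succ n ih =>
    simp only [altInner, List.replicate, runS]
    split_ifs with h
    · rfl
    · exact ih _ _

theorem altOuter_eq_runS (buckets : PySem.Dict Int Int) (cs : List Int) (k ans : Int) :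
    altOuter buckets cs k ans =
      (runS k ans (cs.flatMap (fun c => List.replicate (buckets.getD c 0).toNat c))).2.1 := by
  induction cs generalizing k ans with
  | nil => rfl
  | cons c t ih =>
    simp only [altOuter, List.flatMap_cons, runS_append, altInner_eq_runS]
    by_cases hd : (runS k ans (List.replicate (buckets.getD c 0).toNat c)).2.2
    · simp [hd]
    · simp [hd, ih]

-- sum of an indicator map over a Nodup list containing x
theorem sum_map_indicator {l : List Int} {x : Int} (n : Nat) (hn : l.Nodup) (hx : x ∈ l) :
    (l.map (fun c => if c = x then n else 0)).sum = n := by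
  induction l with
  | nil => cases hx
  | cons c t ih =>
    rcases List.mem_cons.mp hx with h | h
    · subst h
      have : ∀ y ∈ t, (fun c => if c = x then n else 0) y = 0 := by
        intro y hy
        have : y ≠ x := fun e => (List.nodup_cons.mp hn).1 (e ▸ hy)
        simp [this]
      simp [List.map_congr_left this]
    · have hcx : c ≠ x := fun e => (List.nodup_cons.mp hn).1 (e ▸ h)
      simp [hcx, ih (List.nodup_cons.mp hn).2 h]

theorem foldl_max_step_some {α κ : Type} [LT κ] [DecidableLT κ] (key : α → κ) (l : List α) (a : α) :
    ∃ m, l.foldl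
      (fun acc x => match acc with
        | none => some x
        | some m => if key m < key x then some x else some m) (some a) = some m := by
  induction l generalizing a with
  | nil => exact ⟨a, rfl⟩
  | cons x t ih =>
    simp only [List.foldl_cons]
    split_ifs <;> exact ih _

theorem max?_isSome_of_ne_nil {xs : List Int} (h : xs ≠ []) :
    ∃ m, PySem.List.max? xs (fun x => x) = some m := by
  cases xs with
  | nil => exact absurd rfl h
  | cons v vs =>
    simpa [PySem.List.max?] using foldl_max_step_some (fun x : Int => x) vs v

-- every value of Counter(tangerine) is a positive count
theorem vals_pos {tangerine : List Int} {x : Int}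
    (hx : x ∈ (PySem.Dict.counter tangerine).values) : 1 ≤ x := by
  simp only [PySem.Dict.values, PySem.Dict.items_counter, List.map_map, List.mem_map,
    Function.comp] at hx
  obtain ⟨key, hkey, rfl⟩ := hx
  have : key ∈ tangerine := (PySem.Set.mem_ofList tangerine key).mp hkey
  have : 0 < tangerine.count key := List.count_pos_iff.mpr this
  omega

-- the two consumed count sequences coincide
theorem lists_eq (tangerine : List Int) (h : (PySem.Dict.counter tangerine).items ≠ []) :
    ((PySem.List.sorted (PySem.Dict.counter tangerine).items (fun x => x.2) true).map (·.2)) =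
      ((PySem.List.pyRange (PySem.List.maxD (PySem.Dict.counter tangerine).values (fun x => x) 0) 0 (-1)).flatMap
        (fun c => List.replicate ((PySem.Dict.counter (PySem.Dict.counter tangerine).values).getD c 0).toNat c)) := by
  set vals := (PySem.Dict.counter tangerine).values with hvals
  have hvne : vals ≠ [] := by
    intro he
    apply h
    have := congrArg List.length he
    simpa [hvals, PySem.Dict.values] using this
  obtain ⟨mx, hmx⟩ := max?_isSome_of_ne_nil hvne
  have hm : PySem.List.maxD vals (fun x => x) 0 = mx := by
    simp [PySem.List.maxD, hmx]
  rw [hm]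
  have hub : ∀ x ∈ vals, x ≤ mx := fun x hx => PySem.List.max?_isMax hmx x hx
  -- simplify bucket lookup to a plain count
  have hbuck : ∀ c : Int, ((PySem.Dict.counter vals).getD c 0).toNat = vals.count c := by
    intro c
    rw [PySem.Dict.getD_counter]
    exact Int.toNat_natCast _
  have hrng : PySem.List.pyRange mx 0 (-1) = (PySem.List.pyRange 1 (mx + 1)).reverse := by
    simpa using PySem.List.pyRange_neg_one_eq_reverse mx 0
  set LA := (PySem.List.sorted (PySem.Dict.counter tangerine).items (fun x => x.2) true).map (·.2) with hLA
  set LB := (PySem.List.pyRange mx 0 (-1)).flatMap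
      (fun c => List.replicate ((PySem.Dict.counter vals).getD c 0).toNat c) with hLB
  have hLBcount : LB = (PySem.List.pyRange mx 0 (-1)).flatMap (fun c => List.replicate (vals.count c) c) := by
    rw [hLB]
    simp only [hbuck]
  -- LA is descending
  have hpA : LA.Pairwise (fun a b => b ≤ a) := by
    rw [hLA]
    exact List.pairwise_map.mpr (PySem.List.sorted_pairwise_rev _ _)
  -- LB is descending
  have hnd : (PySem.List.pyRange mx 0 (-1)).Nodup := by
    rw [hrng]
    exact List.nodup_reverse.mpr (PySem.List.nodup_pyRange_one 1 (mx + 1))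
  have hpR : (PySem.List.pyRange mx 0 (-1)).Pairwise (fun a b => b < a) := by
    rw [hrng, List.pairwise_reverse]
    exact PySem.List.pairwise_lt_pyRange_one 1 (mx + 1)
  have hpB : LB.Pairwise (fun a b => b ≤ a) := by
    rw [hLBcount]
    rw [List.pairwise_flatMap]
    constructor
    · intro c _
      exact List.pairwise_replicate.mpr (Or.inr le_rfl)
    · refine hpR.imp_of_mem ?_
      intro c1 c2 h1 h2 hlt x hx y hy
      rw [List.eq_of_mem_replicate hx, List.eq_of_mem_replicate hy]
      exact le_of_lt hlt
  -- LA is a permutation of vals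
  have hAperm : LA.Perm vals := by
    rw [hLA, hvals, PySem.Dict.values]
    exact (PySem.List.sorted_perm _ _ true).map _
  -- LB is a permutation of vals
  have hBperm : LB.Perm vals := by
    rw [hLBcount, List.perm_iff_count]
    intro x
    rw [List.count_flatMap]
    have hmapeq : ((PySem.List.pyRange mx 0 (-1)).map
        (List.count x ∘ fun c => List.replicate (vals.count c) c)) =
        (PySem.List.pyRange mx 0 (-1)).map (fun c => if c = x then vals.count x else 0) := by
      refine List.map_congr_left ?_
      intro c _
      simp only [Function.comp, List.count_replicate, beq_iff_eq]
      by_cases hcx : c = x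
      · simp [hcx]
      · simp [hcx]
    rw [hmapeq]
    by_cases hmem : x ∈ PySem.List.pyRange mx 0 (-1)
    · exact sum_map_indicator _ hnd hmem
    · have h0 : vals.count x = 0 := by
        by_contra hne
        have hx : x ∈ vals := List.count_pos_iff.mp (Nat.pos_of_ne_zero hne)
        exact hmem (PySem.List.mem_pyRange_neg_one.mpr ⟨by have := vals_pos hx; omega, hub x hx⟩)
      have : ∀ y ∈ PySem.List.pyRange mx 0 (-1), (fun c => if c = x then vals.count x else 0) y = 0 := by
        intro y hy
        have : y ≠ x := fun e => hmem (e ▸ hy)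
        simp [this]
      rw [List.map_congr_left this]
      simp [h0]
  -- two descending permutations of the same list are equal
  exact List.Perm.eq_of_pairwise (fun a b _ _ h1 h2 => le_antisymm h2 h1) hpA hpB
    (hAperm.trans hBperm.symm)

-- ===== VERDICT (by name: the statement is the Claim_ definition above) =====
theorem solution_spec : Claim_equal_solution := by
  intro k tangerine _
  unfold Spec_solution solution solution_alt
  by_cases hnil : (PySem.Dict.counter tangerine).items = []
  · have hs : PySem.List.sorted ([] : List (Int × Int)) (fun x => x.2) true = [] := rfl
    simp [hnil, hs, aLoop]
  · simp only [if_neg hnil, aLoop_eq_runS, altOuter_eq_runS]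
    rw [lists_eq tangerine hnil]
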